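-- pv_equiv track=rewrite | github.com/AddNap/DocQuill | packages/docquill_core/docquill/engine/ligature_engine.py | detect_ligatures
-- ===== SOURCE A (Python) =====
-- from typing import Any, Dict, List, Optional
--
-- def detect_ligatures(text: str) -> List[tuple[int, int, str]]:
--     """Detect potential ligature opportunities in text.
--
--     Args:
--         text: Text to analyze
--
--     Returns:
--         List of (start_index, end_index, ligature_type) tuples
--     """
--     ligatures = []
--
--     # Common ligature patterns
--     ligature_patterns = {
--         "fi": ("f", "i"),
--         "fl": ("f", "l"),
--         "ff": ("f", "f"),
--         "ffi": ("f", "f", "i"),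
--         "ffl": ("f", "f", "l"),
--         "ft": ("f", "t"),
--     }
--
--     for ligature_type, pattern in ligature_patterns.items():
--         pattern_text = "".join(pattern)
--         start = 0
--         while True:
--             idx = text.find(pattern_text, start)
--             if idx == -1:
--                 break
--             ligatures.append((idx, idx + len(pattern_text), ligature_type))
--             start = idx + 1
--
--     return ligatures
-- ===== SOURCE B (Python) =====
-- def detect_ligatures(text: str) -> list[tuple[int, int, str]]:
--     """Detect potential ligature opportunities in text.
--
--     Single pass over positions: at each index check the six patterns with
--     startswith and collect matches into per-type buckets, then concatenate
--     the buckets in the fixed type order.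
--     """
--     types = ("fi", "fl", "ff", "ffi", "ffl", "ft")
--     buckets = {t: [] for t in types}
--     for i in range(len(text)):
--         for t in types:
--             if text.startswith(t, i):
--                 buckets[t].append((i, i + len(t), t))
--     out = []
--     for t in types:
--         out.extend(buckets[t])
--     return out
-- ===== Notes on version B (the rewrite author's own statement) =====
-- stated objective: alternative
-- what changed: Replaces A's six independent str.find-with-restart scans (one whole-text scan per pattern) by a single left-to-right pass over positions that tests all six patterns with startswith at each index and collects matches into per-type buckets, concatenated in the fixed type order.
import Mathlib
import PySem

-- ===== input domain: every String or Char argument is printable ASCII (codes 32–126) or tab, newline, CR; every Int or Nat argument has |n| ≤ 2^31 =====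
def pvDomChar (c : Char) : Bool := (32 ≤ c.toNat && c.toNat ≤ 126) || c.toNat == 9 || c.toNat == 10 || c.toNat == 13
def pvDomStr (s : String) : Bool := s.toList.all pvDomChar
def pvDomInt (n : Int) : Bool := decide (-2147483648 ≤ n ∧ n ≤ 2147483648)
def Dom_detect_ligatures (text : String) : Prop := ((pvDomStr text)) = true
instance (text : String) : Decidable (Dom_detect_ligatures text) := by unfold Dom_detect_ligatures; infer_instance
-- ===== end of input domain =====

-- B replaces A's six repeated str.find re-scans by one left-to-right pass over the
-- positions that checks all six patterns with startswith and collects per-type buckets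
-- concatenated in the fixed order (objective: alternative traversal, same result).

-- ===== PORT A =====
-- A's 'while True: idx = text.find(pattern_text, start) …' loop, ported with fuel
-- s.length + 1 (the loop runs at most that often: start strictly increases and stays
-- ≤ len; the proof shows the fuel is never exhausted). text.find(p, start) is
-- PySem.Chars.findFrom, exact.
def pvFindLoop (s pat : List Char) (t : String) : Nat → Nat → List (Int × Int × String) → List (Int × Int × String)
  | _, 0, acc => acc
  | start, fuel + 1, acc =>
    let idx := PySem.Chars.findFrom s pat (start : Int)
    if idx = -1 then acc
    else pvFindLoop s pat t (idx.toNat + 1) fuel (acc ++ [(idx, idx + (pat.length : Int), t)])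

-- A's dict literal maps each type to a tuple of chars; '"".join(pattern)' rebuilds the
-- key itself, so the dict iteration is ported as this literal (type, pattern_text) list.
def detect_ligatures (text : String) : List (Int × Int × String) :=
  let s := text.toList
  [("fi", "fi"), ("fl", "fl"), ("ff", "ff"), ("ffi", "ffi"), ("ffl", "ffl"), ("ft", "ft")].foldl
    (fun acc tp => pvFindLoop s tp.2.toList tp.1 0 (s.length + 1) acc) []

-- ===== PORT B =====
-- Python's text.startswith(t, i) for 0 ≤ i ≤ len(text) is exactly
-- PySem.Chars.startswith (text[i:]) t.
def pvBStep (s pat : List Char) (t : String) (i : Nat) (b : List (Int × Int × String)) : List (Int × Int × String) :=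
  if PySem.Chars.startswith (List.drop i s) pat then b ++ [((i : Int), (i : Int) + (pat.length : Int), t)] else b

-- B's dict of buckets has the six fixed literal keys, ported as a 6-tuple of its values
-- in key order (exact: keys are distinct literals, never added or removed).
def detect_ligatures_alt (text : String) : List (Int × Int × String) :=
  let s := text.toList
  let b := (List.range s.length).foldl
    (fun (b : List (Int × Int × String) × List (Int × Int × String) × List (Int × Int × String) ×
              List (Int × Int × String) × List (Int × Int × String) × List (Int × Int × String)) i =>
      (pvBStep s "fi".toList "fi" i b.1,
       pvBStep s "fl".toList "fl" i b.2.1,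
       pvBStep s "ff".toList "ff" i b.2.2.1,
       pvBStep s "ffi".toList "ffi" i b.2.2.2.1,
       pvBStep s "ffl".toList "ffl" i b.2.2.2.2.1,
       pvBStep s "ft".toList "ft" i b.2.2.2.2.2))
    ([], [], [], [], [], [])
  b.1 ++ b.2.1 ++ b.2.2.1 ++ b.2.2.2.1 ++ b.2.2.2.2.1 ++ b.2.2.2.2.2

-- ===== PRECONDITION & SPEC =====
def Spec_detect_ligatures (text : String) (out : List (Int × Int × String)) : Prop := out = detect_ligatures_alt text
instance (text : String) (out : List (Int × Int × String)) : Decidable (Spec_detect_ligatures text out) := by unfold Spec_detect_ligatures; infer_instance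

-- ===== CLAIM (what is proved, stated in full; the proofs are below) =====
def Claim_equal_detect_ligatures : Prop := ∀ (text : String), Dom_detect_ligatures text → Spec_detect_ligatures text (detect_ligatures text)

-- ===== LEMMAS AND PROOFS =====

-- the (i, i+|pat|, t) item and the match predicate, and the canonical occurrence list
def pvF (pat : List Char) (t : String) (i : Nat) : Int × Int × String := ((i : Int), (i : Int) + (pat.length : Int), t)
def pvP (s pat : List Char) (i : Nat) : Bool := PySem.Chars.startswith (List.drop i s) pat

def pvOcc (s pat : List Char) (t : String) (start : Nat) : List (Int × Int × String) :=
  ((List.range' start (s.length - start)).filter (pvP s pat)).map (pvF pat t)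

lemma pvOcc_nil (s pat : List Char) (t : String) (start : Nat)
    (h : ∀ i, start ≤ i → i < s.length → ¬ pat <+: List.drop i s) :
    pvOcc s pat t start = [] := by
  unfold pvOcc
  rw [List.filter_eq_nil_iff.mpr, List.map_nil]
  intro i hi
  rw [List.mem_range'_1] at hi
  simp only [pvP, PySem.Chars.startswith_iff]
  exact fun hp => h i hi.1 (by omega) hp

lemma pvOcc_step (s pat : List Char) (t : String) (start r : Nat)
    (hsr : start ≤ r) (hr : r < s.length) (hp : pat <+: List.drop r s)
    (hmin : ∀ i, start ≤ i → i < r → ¬ pat <+: List.drop i s) :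
    pvOcc s pat t start = pvF pat t r :: pvOcc s pat t (r + 1) := by
  unfold pvOcc
  have hsplit : List.range' start (s.length - start) =
      List.range' start (r - start) ++ List.range' r (s.length - r) := by
    have := @List.range'_append start (r - start) (s.length - r) 1
    rw [show start + 1 * (r - start) = r by omega] at this
    rw [show r - start + (s.length - r) = s.length - start by omega] at this
    exact this.symm
  have hfst : (List.range' start (r - start)).filter (pvP s pat) = [] := by
    rw [List.filter_eq_nil_iff]
    intro i hi
    rw [List.mem_range'_1] at hi
    simp only [pvP, PySem.Chars.startswith_iff]
    exact fun hp' => hmin i hi.1 (by omega) hp'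
  have hsnd : List.range' r (s.length - r) = r :: List.range' (r + 1) (s.length - (r + 1)) := by
    rw [show s.length - r = (s.length - (r + 1)) + 1 by omega, List.range'_succ]
  rw [hsplit, List.filter_append, hfst, List.nil_append, hsnd, List.filter_cons,
    if_pos (by simpa [pvP, PySem.Chars.startswith_iff] using hp), List.map_cons]

-- A's find loop computes the canonical occurrence list
lemma pvFindLoop_eq (s pat : List Char) (t : String) (hpat : pat ≠ []) :
    ∀ fuel start acc, start ≤ s.length → s.length + 1 ≤ fuel + start →
      pvFindLoop s pat t start fuel acc = acc ++ pvOcc s pat t start := by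
  intro fuel
  induction fuel with
  | zero => intro start acc h1 h2; omega
  | succ fuel ih =>
    intro start acc h1 h2
    rw [pvFindLoop]
    by_cases hidx : PySem.Chars.findFrom s pat (start : Int) = -1
    · rw [if_pos hidx]
      rw [PySem.Chars.findFrom_natCast_eq_neg_one_iff s pat start h1] at hidx
      rw [pvOcc_nil s pat t start, List.append_nil]
      intro i hsi hin hp
      refine hidx ?_
      rw [← PySem.Chars.isIn_iff_infix, ← PySem.Chars.exists_prefix_drop_iff_isIn]
      exact ⟨i - start, by rw [List.drop_drop, Nat.add_sub_cancel' hsi]; exact hp⟩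
    · rw [if_neg hidx]
      obtain ⟨hk, hpre, hmin⟩ := PySem.Chars.findFrom_natCast_spec s pat start h1 hidx
      set idx := PySem.Chars.findFrom s pat (start : Int) with hidxdef
      have hidx0 : 0 ≤ idx := le_trans (by exact_mod_cast Nat.zero_le start) hk
      have hcast : ((idx.toNat : Nat) : Int) = idx := Int.toNat_of_nonneg hidx0
      have hsr : start ≤ idx.toNat := by omega
      have hr : idx.toNat < s.length := by
        have h1' : 0 < pat.length := List.length_pos_iff.mpr hpat
        have h2' : pat.length ≤ (List.drop idx.toNat s).length := hpre.length_le
        rw [List.length_drop] at h2'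
        omega
      rw [ih (idx.toNat + 1) _ (by omega) (by omega)]
      rw [pvOcc_step s pat t start idx.toNat hsr hr hpre hmin]
      simp only [pvF, hcast, List.append_assoc, List.singleton_append]

-- B's product fold splits into six independent folds
lemma pvFold6 (s : List Char) (l : List Nat)
    (b : List (Int × Int × String) × List (Int × Int × String) × List (Int × Int × String) ×
         List (Int × Int × String) × List (Int × Int × String) × List (Int × Int × String)) :
    l.foldl
      (fun b i =>
        (pvBStep s "fi".toList "fi" i b.1,
         pvBStep s "fl".toList "fl" i b.2.1,
         pvBStep s "ff".toList "ff" i b.2.2.1,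
         pvBStep s "ffi".toList "ffi" i b.2.2.2.1,
         pvBStep s "ffl".toList "ffl" i b.2.2.2.2.1,
         pvBStep s "ft".toList "ft" i b.2.2.2.2.2)) b
    = (l.foldl (fun c i => pvBStep s "fi".toList "fi" i c) b.1,
       l.foldl (fun c i => pvBStep s "fl".toList "fl" i c) b.2.1,
       l.foldl (fun c i => pvBStep s "ff".toList "ff" i c) b.2.2.1,
       l.foldl (fun c i => pvBStep s "ffi".toList "ffi" i c) b.2.2.2.1,
       l.foldl (fun c i => pvBStep s "ffl".toList "ffl" i c) b.2.2.2.2.1,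
       l.foldl (fun c i => pvBStep s "ft".toList "ft" i c) b.2.2.2.2.2) := by
  induction l generalizing b with
  | nil => rfl
  | cons x xs ih => simp only [List.foldl_cons]; exact ih _

-- one bucket's fold is the canonical occurrence list from 0
lemma pvBucket_eq (s pat : List Char) (t : String) :
    (List.range s.length).foldl (fun c i => pvBStep s pat t i c) [] = pvOcc s pat t 0 := by
  have : (List.range s.length).foldl (fun c i => pvBStep s pat t i c) [] =
      [] ++ ((List.range s.length).filter (pvP s pat)).map (pvF pat t) := by
    rw [← PySem.List.foldl_append_if (pvP s pat) (pvF pat t)]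
    rfl
  rw [this, List.nil_append, pvOcc, List.range_eq_range', Nat.sub_zero]

-- ===== VERDICT (by name: the statement is the Claim_ definition above) =====
theorem detect_ligatures_spec : Claim_equal_detect_ligatures := by
  intro text _
  unfold Spec_detect_ligatures detect_ligatures detect_ligatures_alt
  simp only [List.foldl_cons, List.foldl_nil]
  rw [pvFold6]
  rw [pvBucket_eq, pvBucket_eq, pvBucket_eq, pvBucket_eq, pvBucket_eq, pvBucket_eq]
  rw [pvFindLoop_eq text.toList "fi".toList "fi" (by decide) _ 0 _ (Nat.zero_le _) (by omega),
      pvFindLoop_eq text.toList "fl".toList "fl" (by decide) _ 0 _ (Nat.zero_le _) (by omega),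
      pvFindLoop_eq text.toList "ff".toList "ff" (by decide) _ 0 _ (Nat.zero_le _) (by omega),
      pvFindLoop_eq text.toList "ffi".toList "ffi" (by decide) _ 0 _ (Nat.zero_le _) (by omega),
      pvFindLoop_eq text.toList "ffl".toList "ffl" (by decide) _ 0 _ (Nat.zero_le _) (by omega),
      pvFindLoop_eq text.toList "ft".toList "ft" (by decide) _ 0 _ (Nat.zero_le _) (by omega)]
  simp [List.append_assoc]
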